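-- pv_equiv track=rewrite | github.com/qualifire-dev/elastic-agent-builder-guardrails | workflow_demo.py | _generate_safe_response
-- ===== SOURCE A (Python) =====
-- from typing import Dict, Any, List
--
-- def _generate_safe_response(failed_checks: List[Dict]) -> str:
--     """Generate safe alternative response based on failed checks."""
--
--     if not failed_checks:
--         return "I need to be more careful with my response."
--
--     check_types = [check.get("check_type", "") for check in failed_checks]
--
--     if "hallucinations" in check_types:
--         return "I don't have sufficient reliable information to answer that accurately."
--
--     if "content_moderation" in check_types:
--         return "I can't provide that type of content. How can I help you with something else?"
--
--     if "pii" in check_types: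
--         return "I've detected sensitive personal information in my response. Let me provide a safer answer."
--
--     if "prompt_injections" in check_types:
--         return "I noticed something unusual in the request. Let me provide a helpful response while ensuring security."
--
--     if "grounding" in check_types:
--         return "I want to make sure my response is well-grounded in reliable information."
--
--     if "assertions" in check_types:
--         return "I'm not able to provide specific advice on this topic. Please consult with a qualified professional."
--
--     return "I need to be more careful with my response to ensure accuracy and safety."
-- ===== SOURCE B (Python) =====
-- from typing import Dict, Any, List
--
-- _RANK = {
--     "hallucinations": 0,
--     "content_moderation": 1,
--     "pii": 2,
--     "prompt_injections": 3,
--     "grounding": 4,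
--     "assertions": 5,
-- }
--
-- _MESSAGES = [
--     "I don't have sufficient reliable information to answer that accurately.",
--     "I can't provide that type of content. How can I help you with something else?",
--     "I've detected sensitive personal information in my response. Let me provide a safer answer.",
--     "I noticed something unusual in the request. Let me provide a helpful response while ensuring security.",
--     "I want to make sure my response is well-grounded in reliable information.",
--     "I'm not able to provide specific advice on this topic. Please consult with a qualified professional.",
--     "I need to be more careful with my response to ensure accuracy and safety.",
-- ]
--
-- def _generate_safe_response(failed_checks: List[Dict]) -> str:
--     """Generate safe alternative response based on failed checks."""
--     if not failed_checks:
--         return "I need to be more careful with my response."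
--     best = 6
--     for check in failed_checks:
--         best = min(best, _RANK.get(check.get("check_type", ""), 6))
--     return _MESSAGES[best]
-- ===== Notes on version B (the rewrite author's own statement) =====
-- stated objective: alternative
-- what changed: Instead of A's six sequential membership scans over the list of check types, B makes a single pass computing the minimum priority rank of the failed checks via a rank dictionary and indexes a message table with that rank.
import Mathlib
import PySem

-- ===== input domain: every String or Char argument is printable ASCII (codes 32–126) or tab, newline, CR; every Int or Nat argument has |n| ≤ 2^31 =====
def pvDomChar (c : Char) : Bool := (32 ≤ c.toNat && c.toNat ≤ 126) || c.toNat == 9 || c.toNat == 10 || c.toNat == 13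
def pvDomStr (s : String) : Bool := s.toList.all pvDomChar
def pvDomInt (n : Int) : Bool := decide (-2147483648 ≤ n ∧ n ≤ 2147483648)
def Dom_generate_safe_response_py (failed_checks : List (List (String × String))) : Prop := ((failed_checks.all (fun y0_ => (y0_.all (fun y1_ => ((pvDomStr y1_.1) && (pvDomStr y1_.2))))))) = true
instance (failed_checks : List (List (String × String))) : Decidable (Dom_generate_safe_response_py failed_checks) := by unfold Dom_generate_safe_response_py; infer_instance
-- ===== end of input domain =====

-- B replaces A's six sequential membership scans over the check types by a single pass computing the minimum priority rank of the failed checks and then indexing a message table (alternative decomposition, same cost).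


-- ===== PORT A =====
-- check.get("check_type", "") (key lookup both Pythons perform on each check)
def getCT (check : List (String × String)) : String :=
  (PySem.Dict.ofList check).getD "check_type" ""

def generate_safe_response_py (failed_checks : List (List (String × String))) : String :=
  if failed_checks = [] then "I need to be more careful with my response."
  else
    let check_types := failed_checks.map getCT
    if check_types.contains "hallucinations" then
      "I don't have sufficient reliable information to answer that accurately."
    else if check_types.contains "content_moderation" then
      "I can't provide that type of content. How can I help you with something else?"
    else if check_types.contains "pii" then
      "I've detected sensitive personal information in my response. Let me provide a safer answer."
    else if check_types.contains "prompt_injections" then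
      "I noticed something unusual in the request. Let me provide a helpful response while ensuring security."
    else if check_types.contains "grounding" then
      "I want to make sure my response is well-grounded in reliable information."
    else if check_types.contains "assertions" then
      "I'm not able to provide specific advice on this topic. Please consult with a qualified professional."
    else "I need to be more careful with my response to ensure accuracy and safety."

-- ===== PORT B =====
def rankTable : PySem.Dict String Int :=
  PySem.Dict.ofList
    [("hallucinations", 0), ("content_moderation", 1), ("pii", 2),
     ("prompt_injections", 3), ("grounding", 4), ("assertions", 5)]

def safeMessages : List String :=
  ["I don't have sufficient reliable information to answer that accurately.",
   "I can't provide that type of content. How can I help you with something else?",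
   "I've detected sensitive personal information in my response. Let me provide a safer answer.",
   "I noticed something unusual in the request. Let me provide a helpful response while ensuring security.",
   "I want to make sure my response is well-grounded in reliable information.",
   "I'm not able to provide specific advice on this topic. Please consult with a qualified professional.",
   "I need to be more careful with my response to ensure accuracy and safety."]

def generate_safe_response_py_alt (failed_checks : List (List (String × String))) : String :=
  if failed_checks = [] then "I need to be more careful with my response."
  else
    let best := failed_checks.foldl
      (fun b check => min b (rankTable.getD (getCT check) 6)) 6
    PySem.List.pyGetD safeMessages best ""

-- ===== PRECONDITION & SPEC =====
def Spec_generate_safe_response_py (failed_checks : List (List (String × String))) (out : String) : Prop := out = generate_safe_response_py_alt failed_checks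
instance (failed_checks : List (List (String × String))) (out : String) : Decidable (Spec_generate_safe_response_py failed_checks out) := by unfold Spec_generate_safe_response_py; infer_instance

-- ===== CLAIM =====
def Claim_equal_generate_safe_response_py : Prop := ∀ (failed_checks : List (List (String × String))), Dom_generate_safe_response_py failed_checks → Spec_generate_safe_response_py failed_checks (generate_safe_response_py failed_checks)

-- ===== LEMMAS AND PROOFS =====
-- the rank of a check-type string, written out
theorem rank_eq (s : String) :
    rankTable.getD s 6 =
      if "hallucinations" = s then 0
      else if "content_moderation" = s then 1
      else if "pii" = s then 2
      else if "prompt_injections" = s then 3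
      else if "grounding" = s then 4
      else if "assertions" = s then 5
      else 6 := by
  rw [show rankTable = PySem.Dict.mk
    [("hallucinations", 0), ("content_moderation", 1), ("pii", 2),
     ("prompt_injections", 3), ("grounding", 4), ("assertions", 5)] from rfl]
  simp only [PySem.Dict.getD_eq_get?_getD, PySem.Dict.get?_mk_cons, beq_iff_eq]
  split_ifs <;> rfl

theorem rank_bounds (s : String) : 0 ≤ rankTable.getD s 6 ∧ rankTable.getD s 6 ≤ 6 := by
  rw [rank_eq]; split_ifs <;> omega

-- abbreviation used only by the proofs: B's loop over the extracted check types
def bestOf (ct : List String) (a : Int) : Int :=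
  ct.foldl (fun b s => min b (rankTable.getD s 6)) a

theorem bestOf_cons (s : String) (ct : List String) (a : Int) :
    bestOf (s :: ct) a = bestOf ct (min a (rankTable.getD s 6)) := rfl

theorem bestOf_le_init (ct : List String) (a : Int) : bestOf ct a ≤ a := by
  induction ct generalizing a with
  | nil => simp [bestOf]
  | cons s ct ih => rw [bestOf_cons]; exact le_trans (ih _) (min_le_left _ _)

theorem bestOf_bounds (ct : List String) (a : Int) (h0 : 0 ≤ a) (h6 : a ≤ 6) :
    0 ≤ bestOf ct a ∧ bestOf ct a ≤ 6 := by
  induction ct generalizing a with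
  | nil => exact ⟨h0, h6⟩
  | cons s ct ih =>
    rw [bestOf_cons]
    exact ih _ (le_min h0 (rank_bounds s).1) (le_trans (min_le_left _ _) h6)

theorem bestOf_le_of_mem (ct : List String) (a : Int) {s : String} (hs : s ∈ ct) :
    bestOf ct a ≤ rankTable.getD s 6 := by
  induction ct generalizing a with
  | nil => cases hs
  | cons t ct ih =>
    rw [bestOf_cons]
    rcases List.mem_cons.mp hs with h | h
    · subst h; exact le_trans (bestOf_le_init _ _) (min_le_right _ _)
    · exact ih _ h

theorem bestOf_mem_or_init (ct : List String) (a : Int) :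
    bestOf ct a = a ∨ ∃ s ∈ ct, bestOf ct a = rankTable.getD s 6 := by
  induction ct generalizing a with
  | nil => left; rfl
  | cons t ct ih =>
    rw [bestOf_cons]
    rcases ih (min a (rankTable.getD t 6)) with h | ⟨s, hs, h⟩
    · rcases le_total a (rankTable.getD t 6) with hle | hle
      · left; rw [h, min_eq_left hle]
      · right; exact ⟨t, List.mem_cons_self, by rw [h, min_eq_right hle]⟩
    · right; exact ⟨s, List.mem_cons_of_mem _ hs, h⟩

theorem contains_of_best_eq (ct : List String) {i : Int} {k : String}
    (hb : bestOf ct 6 = i) (hi : i ≠ 6)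
    (huniq : ∀ s, rankTable.getD s 6 = i → k = s) : ct.contains k = true := by
  rcases bestOf_mem_or_init ct 6 with h | ⟨s, hs, h⟩
  · omega
  · have hr : rankTable.getD s 6 = i := by omega
    have hks := huniq s hr
    subst hks
    exact List.elem_eq_true_of_mem hs

theorem best_ne (ct : List String) (k : String) {i : Int}
    (hc : ¬ (ct.contains k = true)) (hi : i ≠ 6)
    (huniq : ∀ s, rankTable.getD s 6 = i → k = s) : bestOf ct 6 ≠ i :=
  fun h => hc (contains_of_best_eq ct h hi huniq)

theorem uniq0 : ∀ s, rankTable.getD s 6 = 0 → "hallucinations" = s := by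
  intro s hr; rw [rank_eq] at hr; split_ifs at hr <;> first | assumption | omega
theorem uniq1 : ∀ s, rankTable.getD s 6 = 1 → "content_moderation" = s := by
  intro s hr; rw [rank_eq] at hr; split_ifs at hr <;> first | assumption | omega
theorem uniq2 : ∀ s, rankTable.getD s 6 = 2 → "pii" = s := by
  intro s hr; rw [rank_eq] at hr; split_ifs at hr <;> first | assumption | omega
theorem uniq3 : ∀ s, rankTable.getD s 6 = 3 → "prompt_injections" = s := by
  intro s hr; rw [rank_eq] at hr; split_ifs at hr <;> first | assumption | omega
theorem uniq4 : ∀ s, rankTable.getD s 6 = 4 → "grounding" = s := by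
  intro s hr; rw [rank_eq] at hr; split_ifs at hr <;> first | assumption | omega
theorem uniq5 : ∀ s, rankTable.getD s 6 = 5 → "assertions" = s := by
  intro s hr; rw [rank_eq] at hr; split_ifs at hr <;> first | assumption | omega

theorem chain_eq (ct : List String) :
    (if ct.contains "hallucinations" then
      "I don't have sufficient reliable information to answer that accurately."
    else if ct.contains "content_moderation" then
      "I can't provide that type of content. How can I help you with something else?"
    else if ct.contains "pii" then
      "I've detected sensitive personal information in my response. Let me provide a safer answer."
    else if ct.contains "prompt_injections" then
      "I noticed something unusual in the request. Let me provide a helpful response while ensuring security."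
    else if ct.contains "grounding" then
      "I want to make sure my response is well-grounded in reliable information."
    else if ct.contains "assertions" then
      "I'm not able to provide specific advice on this topic. Please consult with a qualified professional."
    else "I need to be more careful with my response to ensure accuracy and safety.")
    = PySem.List.pyGetD safeMessages (bestOf ct 6) "" := by
  have hb := bestOf_bounds ct 6 (by norm_num) (by norm_num)
  by_cases c0 : ct.contains "hallucinations" = true
  · have hle : bestOf ct 6 ≤ 0 := by
      have h := bestOf_le_of_mem ct 6 (List.mem_of_elem_eq_true c0)
      have hr : rankTable.getD "hallucinations" 6 = 0 := by rw [rank_eq]; rfl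
      omega
    have heq : bestOf ct 6 = 0 := by omega
    rw [if_pos c0, heq]; rfl
  · by_cases c1 : ct.contains "content_moderation" = true
    · have hle : bestOf ct 6 ≤ 1 := by
        have h := bestOf_le_of_mem ct 6 (List.mem_of_elem_eq_true c1)
        have hr : rankTable.getD "content_moderation" 6 = 1 := by rw [rank_eq]; rfl
        omega
      have hn0 := best_ne ct _ c0 (by norm_num) uniq0
      have heq : bestOf ct 6 = 1 := by omega
      rw [if_neg c0, if_pos c1, heq]; rfl
    · by_cases c2 : ct.contains "pii" = true
      · have hle : bestOf ct 6 ≤ 2 := by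
          have h := bestOf_le_of_mem ct 6 (List.mem_of_elem_eq_true c2)
          have hr : rankTable.getD "pii" 6 = 2 := by rw [rank_eq]; rfl
          omega
        have hn0 := best_ne ct _ c0 (by norm_num) uniq0
        have hn1 := best_ne ct _ c1 (by norm_num) uniq1
        have heq : bestOf ct 6 = 2 := by omega
        rw [if_neg c0, if_neg c1, if_pos c2, heq]; rfl
      · by_cases c3 : ct.contains "prompt_injections" = true
        · have hle : bestOf ct 6 ≤ 3 := by
            have h := bestOf_le_of_mem ct 6 (List.mem_of_elem_eq_true c3)
            have hr : rankTable.getD "prompt_injections" 6 = 3 := by rw [rank_eq]; rfl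
            omega
          have hn0 := best_ne ct _ c0 (by norm_num) uniq0
          have hn1 := best_ne ct _ c1 (by norm_num) uniq1
          have hn2 := best_ne ct _ c2 (by norm_num) uniq2
          have heq : bestOf ct 6 = 3 := by omega
          rw [if_neg c0, if_neg c1, if_neg c2, if_pos c3, heq]; rfl
        · by_cases c4 : ct.contains "grounding" = true
          · have hle : bestOf ct 6 ≤ 4 := by
              have h := bestOf_le_of_mem ct 6 (List.mem_of_elem_eq_true c4)
              have hr : rankTable.getD "grounding" 6 = 4 := by rw [rank_eq]; rfl
              omega
            have hn0 := best_ne ct _ c0 (by norm_num) uniq0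
            have hn1 := best_ne ct _ c1 (by norm_num) uniq1
            have hn2 := best_ne ct _ c2 (by norm_num) uniq2
            have hn3 := best_ne ct _ c3 (by norm_num) uniq3
            have heq : bestOf ct 6 = 4 := by omega
            rw [if_neg c0, if_neg c1, if_neg c2, if_neg c3, if_pos c4, heq]; rfl
          · by_cases c5 : ct.contains "assertions" = true
            · have hle : bestOf ct 6 ≤ 5 := by
                have h := bestOf_le_of_mem ct 6 (List.mem_of_elem_eq_true c5)
                have hr : rankTable.getD "assertions" 6 = 5 := by rw [rank_eq]; rfl
                omega
              have hn0 := best_ne ct _ c0 (by norm_num) uniq0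
              have hn1 := best_ne ct _ c1 (by norm_num) uniq1
              have hn2 := best_ne ct _ c2 (by norm_num) uniq2
              have hn3 := best_ne ct _ c3 (by norm_num) uniq3
              have hn4 := best_ne ct _ c4 (by norm_num) uniq4
              have heq : bestOf ct 6 = 5 := by omega
              rw [if_neg c0, if_neg c1, if_neg c2, if_neg c3, if_neg c4, if_pos c5, heq]; rfl
            · have hn0 := best_ne ct _ c0 (by norm_num) uniq0
              have hn1 := best_ne ct _ c1 (by norm_num) uniq1
              have hn2 := best_ne ct _ c2 (by norm_num) uniq2
              have hn3 := best_ne ct _ c3 (by norm_num) uniq3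
              have hn4 := best_ne ct _ c4 (by norm_num) uniq4
              have hn5 := best_ne ct _ c5 (by norm_num) uniq5
              have heq : bestOf ct 6 = 6 := by omega
              rw [if_neg c0, if_neg c1, if_neg c2, if_neg c3, if_neg c4, if_neg c5, heq]; rfl

-- ===== VERDICT =====
theorem generate_safe_response_py_spec : Claim_equal_generate_safe_response_py := by
  intro fcs _
  unfold Spec_generate_safe_response_py generate_safe_response_py generate_safe_response_py_alt
  by_cases hfcs : fcs = []
  · simp [hfcs]
  · simp only [if_neg hfcs]
    have hfold : fcs.foldl (fun b check => min b (rankTable.getD (getCT check) 6)) 6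
        = bestOf (fcs.map getCT) 6 := by
      rw [bestOf, List.foldl_map]
    rw [hfold]
    exact chain_eq (fcs.map getCT)
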